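-- pv_equiv track=rewrite | github.com/lanlab-org/EnglishPal | app/page.py | get_answer_part
-- ===== SOURCE A (Python) =====
-- def get_answer_part(s):
--     s = s.strip()
--     result = []
--     flag = 0
--     for line in s.split('\n'):
--         line = line.strip()
--         if line == 'ANSWER':
--             flag = 1
--         elif flag == 1:
--             result.append(line)
--     # https://css-tricks.com/snippets/javascript/showhide-element/
--     js = ''' '''
--     html_code = js
--     html_code += '\n'
--     html_code += '<button onclick="toggle_visibility(\'answer\');">ANSWER</button>\n'
--     html_code += '<div id="answer" style="display:none;">%s</div>\n' % ('\n'.join(result))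
--     return html_code
-- ===== SOURCE B (Python) =====
-- def get_answer_part(s):
--     lines = [ln.strip() for ln in s.strip().split('\n')]
--     try:
--         i = lines.index('ANSWER')
--         result = [ln for ln in lines[i + 1:] if ln != 'ANSWER']
--     except ValueError:
--         result = []
--     js = ''' '''
--     html_code = js
--     html_code += '\n'
--     html_code += '<button onclick="toggle_visibility(\'answer\');">ANSWER</button>\n'
--     html_code += '<div id="answer" style="display:none;">%s</div>\n' % ('\n'.join(result))
--     return html_code
-- ===== Notes on version B (the rewrite author's own statement) =====
-- stated objective: alternative
-- what changed: Replaces A's stateful flag-accumulator loop by locating the first ANSWER marker with list.index and taking a slice-then-filter comprehension of the suffix.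
import Mathlib
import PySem

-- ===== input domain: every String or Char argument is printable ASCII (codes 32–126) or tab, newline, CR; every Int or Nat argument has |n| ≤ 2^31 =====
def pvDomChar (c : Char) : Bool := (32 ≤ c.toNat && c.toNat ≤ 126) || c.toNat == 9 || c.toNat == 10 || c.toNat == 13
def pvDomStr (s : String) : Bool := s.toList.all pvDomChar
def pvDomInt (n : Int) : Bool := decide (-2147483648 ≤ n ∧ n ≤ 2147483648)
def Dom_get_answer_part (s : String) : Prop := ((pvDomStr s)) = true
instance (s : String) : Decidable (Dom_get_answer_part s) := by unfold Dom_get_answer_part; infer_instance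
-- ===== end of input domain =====

-- B replaces A's stateful flag-accumulator loop by index-the-marker, slice the suffix, filter (alternative decomposition; same cost).

-- ===== PORT A =====
-- the flag/accumulator loop step of A ('if line == ANSWER: flag = 1; elif flag == 1: result.append(line)')
def pvStepA (st : List String × Int) (line : String) : List String × Int :=
  let line := PySem.Str.strip line
  if line == "ANSWER" then (st.1, 1)
  else if st.2 == 1 then (st.1 ++ [line], st.2)
  else st

def get_answer_part (s : String) : String :=
  let s := PySem.Str.strip s
  let st := ((PySem.Str.split? s "\n").getD []).foldl pvStepA ([], 0)
  let result := st.1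
  let js := " "
  let html_code := js
  let html_code := html_code ++ "\n"
  let html_code := html_code ++ "<button onclick=\"toggle_visibility('answer');\">ANSWER</button>\n"
  let html_code := html_code ++ "<div id=\"answer\" style=\"display:none;\">" ++ PySem.Str.join "\n" result ++ "</div>\n"
  html_code

-- ===== PORT B =====
def get_answer_part_alt (s : String) : String :=
  let lines := ((PySem.Str.split? (PySem.Str.strip s) "\n").getD []).map PySem.Str.strip
  let result :=
    match PySem.List.index? lines "ANSWER" with
    | some i => (PySem.List.slice lines (some ((i : Int) + 1)) none).filter (· != "ANSWER")
    | none => []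
  let js := " "
  let html_code := js
  let html_code := html_code ++ "\n"
  let html_code := html_code ++ "<button onclick=\"toggle_visibility('answer');\">ANSWER</button>\n"
  let html_code := html_code ++ "<div id=\"answer\" style=\"display:none;\">" ++ PySem.Str.join "\n" result ++ "</div>\n"
  html_code

-- ===== PRECONDITION & SPEC =====
def Spec_get_answer_part (s : String) (out : String) : Prop := out = get_answer_part_alt s
instance (s : String) (out : String) : Decidable (Spec_get_answer_part s out) := by unfold Spec_get_answer_part; infer_instance

-- ===== CLAIM (what is proved, stated in full; the proofs are below) =====
def Claim_equal_get_answer_part : Prop := ∀ (s : String), Dom_get_answer_part s → Spec_get_answer_part s (get_answer_part s)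

-- ===== LEMMAS AND PROOFS =====

-- A's step on an already-stripped line
def pvStepA' (st : List String × Int) (line : String) : List String × Int :=
  if line == "ANSWER" then (st.1, 1)
  else if st.2 == 1 then (st.1 ++ [line], st.2)
  else st

theorem pvFoldA_eq (pieces : List String) (st : List String × Int) :
    pieces.foldl pvStepA st = (pieces.map PySem.Str.strip).foldl pvStepA' st := by
  rw [List.foldl_map]; rfl

theorem pvLoop_flag1 (ls : List String) (acc : List String) :
    ls.foldl pvStepA' (acc, 1) = (acc ++ ls.filter (· != "ANSWER"), 1) := by
  induction ls generalizing acc with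
  | nil => simp
  | cons l ls ih =>
    by_cases h : l = "ANSWER"
    · subst h; simp [pvStepA', ih]
    · simp [pvStepA', h, ih]

theorem pvLoop_flag0 (ls : List String) (acc : List String) :
    (ls.foldl pvStepA' (acc, 0)).1 = acc ++
      (match PySem.List.index? ls "ANSWER" with
       | some i => (ls.drop (i + 1)).filter (· != "ANSWER")
       | none => ([] : List String)) := by
  induction ls generalizing acc with
  | nil => simp [PySem.List.index?]
  | cons l ls ih =>
    by_cases h : l = "ANSWER"
    · subst h
      rw [List.foldl_cons]
      have hstep : pvStepA' (acc, 0) "ANSWER" = (acc, 1) := by simp [pvStepA']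
      rw [hstep, pvLoop_flag1, PySem.List.index?_cons_self]
      simp
    · have hidx : PySem.List.index? (l :: ls) "ANSWER"
          = (PySem.List.index? ls "ANSWER").map (· + 1) :=
        PySem.List.index?_cons_of_ne ls h
      simp only [List.foldl_cons]
      have hstep : pvStepA' (acc, 0) l = (acc, 0) := by
        simp [pvStepA', h]
      rw [hstep, ih, hidx]
      cases PySem.List.index? ls "ANSWER" with
      | none => simp
      | some i => simp

theorem pvSlice_succ (ls : List String) (i : Nat) :
    PySem.List.slice ls (some ((i : Int) + 1)) none = ls.drop (i + 1) := by
  have : ((i : Int) + 1) = ((i + 1 : Nat) : Int) := by push_cast; ring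
  rw [this, PySem.List.slice_from_natCast]

theorem pvResult_eq (pieces : List String) :
    (pieces.foldl pvStepA ([], 0)).1 =
      (match PySem.List.index? (pieces.map PySem.Str.strip) "ANSWER" with
       | some i => (PySem.List.slice (pieces.map PySem.Str.strip) (some ((i : Int) + 1)) none).filter (· != "ANSWER")
       | none => ([] : List String)) := by
  rw [pvFoldA_eq, pvLoop_flag0]
  cases PySem.List.index? (pieces.map PySem.Str.strip) "ANSWER" with
  | none => simp
  | some i => simp [pvSlice_succ]

-- ===== VERDICT (by name: the statement is the Claim_ definition above) =====
theorem get_answer_part_spec : Claim_equal_get_answer_part := by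
  intro s _
  unfold Spec_get_answer_part
  simp only [get_answer_part, get_answer_part_alt, pvResult_eq]
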